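-- pv_equiv track=rewrite | github.com/jabozzo/delta_sigma_pipe_lascas_2020 | calib/calib/misc.py | iterate_combinations
-- ===== SOURCE A (Python) =====
-- def iterate_combinations(n, k):
--     if k > n:
--         raise ValueError("k ({}) must be less or equal than n ({}).".format(k, n))
--     elif k <= 0:
--         raise ValueError("k ({}) must be greater than 0.".format(k))
--     state = tuple(range(k))
--
--     def update(state, index):
--         inv_index = k-index
--         limit = n - inv_index
--         if state[index] >= limit:
--             return update(state, index-1)
--         else:
--             start_point = state[index] + 1
--             return state[0:index] + tuple(range(start_point, start_point + inv_index))
--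
--     while state[0] <= n - k:
--         yield state
--         try:
--             state = update(state, k-1)
--         except IndexError:
--             break
-- ===== SOURCE B (Python) =====
-- def iterate_combinations(n, k):
--     if k > n:
--         raise ValueError("k ({}) must be less or equal than n ({}).".format(k, n))
--     elif k <= 0:
--         raise ValueError("k ({}) must be greater than 0.".format(k))
--     indices = list(range(k))
--     while True:
--         yield tuple(indices)
--         i = k - 1
--         while i >= 0 and indices[i] == i + n - k:
--             i -= 1
--         if i < 0:
--             return
--         indices[i] += 1
--         for j in range(i + 1, k):
--             indices[j] = indices[j - 1] + 1
-- ===== Notes on version B (the rewrite author's own statement) =====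
-- stated objective: alternative
-- what changed: Replaces A's recursive successor over tuple slices (which walks into Python negative indexing and is terminated by a caught IndexError) with the standard iterative generator: an in-place index list, a downward scan for the first non-maximal position, and an explicit stop when none exists.
import Mathlib
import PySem

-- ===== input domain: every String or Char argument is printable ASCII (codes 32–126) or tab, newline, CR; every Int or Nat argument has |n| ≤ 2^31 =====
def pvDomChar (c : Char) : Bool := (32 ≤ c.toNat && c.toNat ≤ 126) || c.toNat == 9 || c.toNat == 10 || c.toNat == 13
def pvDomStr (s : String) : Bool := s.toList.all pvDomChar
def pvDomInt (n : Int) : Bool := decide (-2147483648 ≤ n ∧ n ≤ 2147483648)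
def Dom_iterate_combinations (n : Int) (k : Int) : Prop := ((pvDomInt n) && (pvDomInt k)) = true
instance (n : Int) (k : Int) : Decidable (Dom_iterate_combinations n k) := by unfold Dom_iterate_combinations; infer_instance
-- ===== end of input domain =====

-- B replaces A's recursive tuple-slice successor (terminated by a caught IndexError) with the
-- standard iterative index-list generator (downward scan, explicit stop); same sequence, same cost.

-- ===== PORT A =====
-- A's inner 'update': recursion on the index, which DECREASES past 0 into Python's negative
-- indexing until state[index] raises IndexError (= pyGet? none). Fuel is only a totality
-- device (2*k+2 exceeds the number of recursive calls possible before the index leaves range).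
def updateA (n k : Int) : Nat → List Int → Int → Option (List Int)
  | 0, _, _ => none
  | fuel+1, state, index =>
    match PySem.List.pyGet? state index with
    | none => none            -- IndexError
    | some v =>
      if v ≥ n - (k - index) then
        updateA n k fuel state (index - 1)
      else
        some (PySem.List.slice state (some 0) (some index) ++
              PySem.List.pyRange (v + 1) (v + 1 + (k - index)) 1)

-- A's 'while state[0] <= n - k' loop; 'none' from updateA is the caught IndexError → break.
-- (Under Pre_ the state is never empty, so the pyGet? none branch of the guard is unreachable.)
def loopA (n k : Int) : Nat → List Int → List (List Int)
  | 0, _ => []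
  | fuel+1, state =>
    match PySem.List.pyGet? state 0 with
    | none => []
    | some h =>
      if h ≤ n - k then
        state ::
          (match updateA n k (2 * k.toNat + 2) state (k - 1) with
           | none => []
           | some s => loopA n k fuel s)
      else []

-- Fuel = C(n,k)+1 bounds the number of yields; the loop itself stops via the IndexError break.
def iterate_combinations (n : Int) (k : Int) : List (List Int) :=
  loopA n k (Nat.choose n.toNat k.toNat + 1) (PySem.List.pyRange 0 k 1)

-- ===== PORT B =====
-- Source B's inner 'while i >= 0 and indices[i] == i + n - k: i -= 1', transcribed on the
-- counter m = i+1 (m = 0 means i < 0: no position found → generator returns).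
def scanB (n k : Int) (ind : List Int) : Nat → Option Nat
  | 0 => none
  | i+1 => if ind.getD i 0 = (i : Int) + n - k then scanB n k ind i else some i

-- 'indices[i] += 1; for j in range(i+1, k): indices[j] = indices[j-1] + 1' — the list keeps
-- its prefix below i and becomes the consecutive run v+1, v+2, … from position i on.
def stepB (n k : Int) (ind : List Int) : Option (List Int) :=
  match scanB n k ind k.toNat with
  | none => none
  | some i =>
    some (ind.take i ++ List.map (fun t : Nat => ind.getD i 0 + 1 + (t : Int)) (List.range (k.toNat - i)))

-- Source B's 'while True: yield; scan; stop-or-step' loop (same fuel device as A's port).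
def loopB (n k : Int) : Nat → List Int → List (List Int)
  | 0, _ => []
  | fuel+1, ind =>
    ind :: (match stepB n k ind with
            | none => []
            | some s => loopB n k fuel s)

def iterate_combinations_alt (n : Int) (k : Int) : List (List Int) :=
  loopB n k (Nat.choose n.toNat k.toNat + 1) (PySem.List.pyRange 0 k 1)

-- ===== PRECONDITION & SPEC =====
-- A raises ValueError when k > n or k ≤ 0; Pre_ admits exactly the inputs where A returns.
def Pre_iterate_combinations (n : Int) (k : Int) : Prop := 0 < k ∧ k ≤ n
instance (n : Int) (k : Int) : Decidable (Pre_iterate_combinations n k) := by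
  unfold Pre_iterate_combinations; infer_instance

def pvWitness_iterate_combinations : Int × Int := (5, 3)

def Spec_iterate_combinations (n : Int) (k : Int) (out : List (List Int)) : Prop := out = iterate_combinations_alt n k
instance (n : Int) (k : Int) (out : List (List Int)) : Decidable (Spec_iterate_combinations n k out) := by unfold Spec_iterate_combinations; infer_instance

-- ===== CLAIM (what is proved, stated in full; the proofs are below) =====
def Claim_equal_iterate_combinations : Prop := ∀ (n : Int) (k : Int), Dom_iterate_combinations n k → Pre_iterate_combinations n k → Spec_iterate_combinations n k (iterate_combinations n k)

-- ===== LEMMAS AND PROOFS =====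

-- Loop invariant: a state is a strictly increasing k-combination of range(n), position-bounded.
def CombInv (n k : Int) (s : List Int) : Prop :=
  s.length = k.toNat ∧
  (∀ p, p < k.toNat → (p : Int) ≤ s.getD p 0 ∧ s.getD p 0 ≤ n - k + p) ∧
  (∀ p, p + 1 < k.toNat → s.getD p 0 < s.getD (p + 1) 0)

theorem pvGet_inRange (s : List Int) (j v : Int) (h : PySem.List.pyGet? s j = some v) :
    -(s.length : Int) ≤ j ∧ j < s.length := by
  by_contra hc
  have hn : PySem.List.pyGet? s j = none := by
    rw [PySem.List.pyGet?_eq_none_iff]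
    simp [PySem.Raise.InRange]; omega
  simp [hn] at h

theorem pvGet_nonneg (s : List Int) (j v : Int) (h0 : 0 ≤ j)
    (h : PySem.List.pyGet? s j = some v) : v = s.getD j.toNat 0 := by
  rw [PySem.List.pyGet?_of_nonneg s h0] at h
  simp [List.getD_eq_getElem?_getD, h]

theorem pvGet_neg (s : List Int) (j v : Int) (hj : j < 0) (hle : -(s.length : Int) ≤ j)
    (h : PySem.List.pyGet? s j = some v) : v = s.getD (s.length - (-j).toNat) 0 := by
  have h3 := PySem.List.pyGet?_neg_natCast s (-j).toNat (by omega) (by omega)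
  have hjj : -(((-j).toNat : Nat) : Int) = j := by omega
  rw [hjj] at h3
  rw [h3] at h
  simp [List.getD_eq_getElem?_getD, h]

theorem pvGet_nat (s : List Int) (i : Nat) (h : i < s.length) :
    PySem.List.pyGet? s (i : Int) = some (s.getD i 0) := by
  rw [PySem.List.pyGet?_natCast]
  simp [List.getElem?_eq_getElem h, List.getD_eq_getElem?_getD]

theorem inv_init (n k : Int) (hkn : k ≤ n) :
    CombInv n k (PySem.List.pyRange 0 k 1) := by
  have hr : PySem.List.pyRange 0 k 1 = List.map (fun j : Nat => (j : Int)) (List.range k.toNat) := by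
    rw [PySem.List.pyRange_one, sub_zero]; simp only [zero_add]
  refine ⟨?_, ?_, ?_⟩ <;> rw [hr]
  · simp
  · intro p hp
    rw [PySem.List.getD_map_range _ _ _ _ (by omega)]
    constructor <;> omega
  · intro p hp
    rw [PySem.List.getD_map_range _ _ _ _ (by omega),
        PySem.List.getD_map_range _ _ _ _ (by omega)]
    omega

-- On a fully maximal state A's update recurses through the negative indices to IndexError.
theorem updateA_max (n k : Int) (s : List Int)
    (hlen : s.length = k.toNat)
    (hmax : ∀ p, p < k.toNat → s.getD p 0 = n - k + p) :
    ∀ (f : Nat) (j : Int), j < k → (j + k + 2).toNat ≤ f → updateA n k f s j = none := by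
  intro f
  induction f with
  | zero => intro j _ _; simp [updateA]
  | succ f ih =>
    intro j hjk hfuel
    cases hget : PySem.List.pyGet? s j with
    | none => simp [updateA, hget]
    | some v =>
      have hin := pvGet_inRange s j v hget
      have hge : v ≥ n - (k - j) := by
        by_cases h0 : 0 ≤ j
        · have hv := pvGet_nonneg s j v h0 hget
          have hm := hmax j.toNat (by omega)
          omega
        · have hv := pvGet_neg s j v (by omega) (by omega) hget
          have hm := hmax (s.length - (-j).toNat) (by omega)
          omega
      simp only [updateA, hget]
      rw [if_pos hge]
      exact ih (j - 1) (by omega) (by omega)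

theorem scanB_some_spec (n k : Int) (s : List Int) :
    ∀ (m j : Nat), scanB n k s m = some j → j < m ∧ s.getD j 0 ≠ (j : Int) + n - k := by
  intro m
  induction m with
  | zero => intro j h; simp [scanB] at h
  | succ i ih =>
    intro j h
    simp only [scanB] at h
    split at h
    · have := ih j h; exact ⟨by omega, this.2⟩
    · cases h; exact ⟨by omega, by assumption⟩

-- A's update from index i (everything above i maximal) computes exactly B's scan-and-fill step.
theorem updateA_scan (n k : Int) (s : List Int) (hk : 0 < k) (hI : CombInv n k s) :
    ∀ (i : Nat) (f : Nat), i < k.toNat →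
      (∀ p, i < p → p < k.toNat → s.getD p 0 = n - k + p) →
      i + k.toNat + 3 ≤ f →
      updateA n k f s (i : Int) =
        (match scanB n k s (i + 1) with
         | none => none
         | some j => some (s.take j ++ List.map (fun t : Nat => s.getD j 0 + 1 + (t : Int)) (List.range (k.toNat - j)))) := by
  obtain ⟨hlen, hbnd, hmono⟩ := hI
  intro i
  induction i with
  | zero =>
    intro f h0k hmax hf
    obtain ⟨f', rfl⟩ : ∃ f', f = f' + 1 := ⟨f - 1, by omega⟩
    rw [show ((0 : Nat) : Int) = (0 : Int) by norm_num] at *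
    have hget0 : PySem.List.pyGet? s 0 = some (s.getD 0 0) := by
      have := pvGet_nat s 0 (by omega); simpa using this
    simp only [updateA, hget0]
    by_cases hc : s.getD 0 0 ≥ n - (k - 0)
    · rw [if_pos hc]
      have hb := hbnd 0 (by omega)
      have hs0 : s.getD 0 0 = n - k + 0 := by omega
      have hsc : scanB n k s 1 = none := by
        simp only [scanB]
        rw [if_pos (by push_cast; omega)]
      rw [hsc]
      exact updateA_max n k s hlen
        (fun p hp => by
          rcases Nat.eq_zero_or_pos p with h | h
          · subst h; omega
          · exact hmax p (by omega) hp)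
        f' (-1) (by omega) (by omega)
    · rw [if_neg hc]
      have hsc : scanB n k s 1 = some 0 := by
        simp only [scanB]
        rw [if_neg (by push_cast; omega)]
      rw [hsc]
      congr 1
      rw [PySem.List.slice_zero_start, PySem.List.slice_to s (b := 0) (by omega), PySem.List.pyRange_one]
      have h1 : (s.getD 0 0 + 1 + (k - 0) - (s.getD 0 0 + 1)).toNat = k.toNat - 0 := by omega
      rw [h1]
      simp
  | succ i ih =>
    intro f hik hmax hf
    obtain ⟨f', rfl⟩ : ∃ f', f = f' + 1 := ⟨f - 1, by omega⟩
    have hget1 : PySem.List.pyGet? s ((i + 1 : Nat) : Int) = some (s.getD (i + 1) 0) :=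
      pvGet_nat s (i + 1) (by omega)
    simp only [updateA, hget1]
    by_cases hc : s.getD (i + 1) 0 ≥ n - (k - ((i + 1 : Nat) : Int))
    · rw [if_pos hc]
      have hb := hbnd (i + 1) (by omega)
      have hv : s.getD (i + 1) 0 = n - k + ((i + 1 : Nat) : Int) := by push_cast at *; omega
      have hidx : ((i + 1 : Nat) : Int) - 1 = (i : Int) := by push_cast; ring
      rw [hidx]
      have hsc : scanB n k s (i + 1 + 1) = scanB n k s (i + 1) := by
        simp only [scanB]
        rw [if_pos (by push_cast at *; omega)]
      rw [hsc]
      refine ih f' (by omega)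
        (fun p hp hpk => by
          rcases Nat.lt_or_ge p (i + 1) with h | h
          · omega
          · rcases Nat.eq_or_lt_of_le h with h' | h'
            · subst h'; push_cast at hv ⊢; omega
            · exact hmax p (by omega) hpk)
        (by omega)
    · rw [if_neg hc]
      have hsc : scanB n k s (i + 1 + 1) = some (i + 1) := by
        simp only [scanB]
        rw [if_neg (by push_cast at hc ⊢; omega)]
      rw [hsc]
      congr 1
      rw [PySem.List.slice_zero_start, PySem.List.slice_to s (b := ((i + 1 : Nat) : Int)) (by positivity), PySem.List.pyRange_one]
      have h1 : (s.getD (i + 1) 0 + 1 + (k - ((i + 1 : Nat) : Int)) - (s.getD (i + 1) 0 + 1)).toNat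
                  = k.toNat - (i + 1) := by omega
      have h2 : (((i + 1 : Nat) : Int)).toNat = i + 1 := by omega
      rw [h1, h2]

-- getD of B's stepped state.
theorem step_getD (s : List Int) (j : Nat) (kN : Nat) (hj : j < kN) (hlen : s.length = kN)
    (p : Nat) (hp : p < kN) :
    (s.take j ++ List.map (fun t : Nat => s.getD j 0 + 1 + (t : Int)) (List.range (kN - j))).getD p 0 =
      if p < j then s.getD p 0 else s.getD j 0 + 1 + ((p - j : Nat) : Int) := by
  by_cases h : p < j
  · rw [if_pos h, List.getD_append _ _ _ _ (by simp; omega)]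
    simp [List.getD_eq_getElem?_getD, List.getElem?_take_of_lt h]
  · rw [if_neg h]
    rw [List.getD_append_right _ _ _ _ (by simp; omega)]
    have hl : (s.take j).length = j := by simp; omega
    rw [hl]
    rw [PySem.List.getD_map_range _ _ _ _ (by omega)]

-- B's step preserves the invariant.
theorem stepB_inv (n k : Int) (s s' : List Int) (hI : CombInv n k s)
    (hs : stepB n k s = some s') : CombInv n k s' := by
  obtain ⟨hlen, hbnd, hmono⟩ := hI
  simp only [stepB] at hs
  cases hsc : scanB n k s k.toNat with
  | none => rw [hsc] at hs; simp at hs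
  | some j =>
    rw [hsc] at hs
    simp only [Option.some.injEq] at hs
    obtain ⟨hjlt, hjne⟩ := scanB_some_spec n k s k.toNat j hsc
    have hbj := hbnd j hjlt
    have hvlt : s.getD j 0 < n - k + j := by omega
    subst hs
    have hg := fun p hp => step_getD s j k.toNat hjlt hlen p hp
    refine ⟨by simp; omega, ?_, ?_⟩
    · intro p hp
      rw [hg p hp]
      split_ifs with h
      · exact hbnd p hp
      · have := hbnd j hjlt
        constructor <;> omega
    · intro p hp
      rw [hg p (by omega), hg (p + 1) hp]
      split_ifs with h1 h2
      · exact hmono p hp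
      · have hpj : p + 1 = j := by omega
        have hmp := hmono p (by omega)
        rw [hpj] at hmp ⊢
        omega
      · omega
      · omega

-- Bisimulation of the two loops.
theorem loop_eq (n k : Int) (hk : 0 < k) (hkn : k ≤ n) :
    ∀ (F : Nat) (s : List Int), CombInv n k s → loopA n k F s = loopB n k F s := by
  intro F
  induction F with
  | zero => intro s _; rfl
  | succ F ih =>
    intro s hI
    obtain ⟨hlen, hbnd, hmono⟩ := hI
    have hget0 : PySem.List.pyGet? s 0 = some (s.getD 0 0) := by
      have := pvGet_nat s 0 (by omega); simpa using this
    simp only [loopA, loopB, hget0]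
    have hb0 := hbnd 0 (by omega)
    rw [if_pos (by omega)]
    have hupd := updateA_scan n k s hk ⟨hlen, hbnd, hmono⟩ (k.toNat - 1) (2 * k.toNat + 2)
      (by omega) (fun p hp hpk => by omega) (by omega)
    have hidx : ((k.toNat - 1 : Nat) : Int) = k - 1 := by omega
    have h1 : k.toNat - 1 + 1 = k.toNat := by omega
    rw [hidx, h1] at hupd
    rw [hupd]
    simp only [stepB]
    cases hsc : scanB n k s k.toNat with
    | none => rfl
    | some j =>
      congr 1
      exact ih _ (stepB_inv n k s _ ⟨hlen, hbnd, hmono⟩ (by simp [stepB, hsc]))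

-- ===== VERDICT (by name: the statement is the Claim_ definition above) =====
theorem iterate_combinations_spec : Claim_equal_iterate_combinations := by
  intro n k _ hpre
  unfold Spec_iterate_combinations iterate_combinations iterate_combinations_alt
  exact loop_eq n k hpre.1 hpre.2 _ _ (inv_init n k hpre.2)
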